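-- pv_equiv track=rewrite | github.com/HKUSTDial/StatQA | Model Answer/Task Performance/task_confusion_analysis.py | determine_task
-- ===== SOURCE A (Python) =====
-- from collections import Counter
--
-- def determine_task(method_list, tasks_to_methods):
--     method_count = Counter(method_list)
--     task_scores = {task: 0 for task in tasks_to_methods.keys()}
--
--     for method, count in method_count.items():
--         for task, methods in tasks_to_methods.items():
--             if method in methods:
--                 task_scores[task] += count
--
--     # Determine the task with the highest score
--     highest_score_task = max(task_scores, key=task_scores.get)
--     return highest_score_task
-- ===== SOURCE B (Python) =====
-- def determine_task(method_list, tasks_to_methods):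
--     # One pass over tasks_to_methods builds a method -> [tasks] index,
--     # then one pass over method_list accumulates scores; final scan keeps first max.
--     scores = {task: 0 for task in tasks_to_methods}
--     index = {}
--     for task, methods in tasks_to_methods.items():
--         for method in dict.fromkeys(methods):
--             index.setdefault(method, []).append(task)
--     for method in method_list:
--         for task in index.get(method, []):
--             scores[task] += 1
--     best = None
--     for task, score in scores.items():
--         if best is None or score > best[1]:
--             best = (task, score)
--     return best[0]
-- ===== Notes on version B (the rewrite author's own statement) =====
-- stated objective: faster
-- what changed: Replaced the nested scan (for every distinct method, scan all tasks and test list membership) by a precomputed method->tasks index built in one pass over tasks_to_methods, a single accumulation pass over method_list, and an explicit first-max scan instead of max(..., key=...).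
import Mathlib
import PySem

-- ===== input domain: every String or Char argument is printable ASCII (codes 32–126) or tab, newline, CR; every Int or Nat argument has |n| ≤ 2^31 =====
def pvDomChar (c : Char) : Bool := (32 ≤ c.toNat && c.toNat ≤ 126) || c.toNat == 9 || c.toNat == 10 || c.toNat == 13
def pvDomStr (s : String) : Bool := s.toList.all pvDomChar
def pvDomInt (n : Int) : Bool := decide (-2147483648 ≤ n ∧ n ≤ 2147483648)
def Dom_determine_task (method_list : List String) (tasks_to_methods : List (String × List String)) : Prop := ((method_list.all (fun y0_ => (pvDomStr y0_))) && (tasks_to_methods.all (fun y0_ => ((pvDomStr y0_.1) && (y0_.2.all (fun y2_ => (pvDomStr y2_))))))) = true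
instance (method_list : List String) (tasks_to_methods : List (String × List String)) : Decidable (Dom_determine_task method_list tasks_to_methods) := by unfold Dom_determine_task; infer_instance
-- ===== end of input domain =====

-- B replaces A's nested distinct-method × task scan by a precomputed method→tasks index,
-- one accumulation pass over method_list, and an explicit first-max scan (faster in a timing run).


-- ===== PORT A =====
-- the dict parameter arrives as an association list; as in Python it is a dict: ofList
def determine_task (method_list : List String) (tasks_to_methods : List (String × List String)) : String :=
  let ttm : PySem.Dict String (List String) := PySem.Dict.ofList tasks_to_methods
  let method_count : PySem.Dict String Int := PySem.Dict.counter method_list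
  let task_scores : PySem.Dict String Int :=
    ttm.keys.foldl (fun d t => d.insert t 0) PySem.Dict.empty
  let task_scores :=
    method_count.items.foldl (fun ts mc =>
      ttm.items.foldl (fun ts tm =>
        if mc.1 ∈ tm.2 then ts.modify tm.1 0 (· + mc.2) else ts) ts) task_scores
  -- max(task_scores, key=task_scores.get); none = ValueError, excluded by Pre_
  (PySem.List.max? task_scores.keys (fun t => task_scores.getD t 0)).getD ""

-- ===== PORT B =====
def determine_task_alt (method_list : List String) (tasks_to_methods : List (String × List String)) : String :=
  let ttm : PySem.Dict String (List String) := PySem.Dict.ofList tasks_to_methods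
  let scores : PySem.Dict String Int :=
    ttm.keys.foldl (fun d t => d.insert t 0) PySem.Dict.empty
  let index : PySem.Dict String (List String) :=
    ttm.items.foldl (fun idx tm =>
      (PySem.List.dedup tm.2).foldl (fun idx m => idx.modify m [] (· ++ [tm.1])) idx)
      PySem.Dict.empty
  let scores :=
    method_list.foldl (fun sc m =>
      (index.getD m []).foldl (fun sc t => sc.modify t 0 (· + 1)) sc) scores
  let best : Option (String × Int) :=
    scores.items.foldl (fun best p =>
      match best with
      | none => some p
      | some q => if p.2 > q.2 then some p else some q) none
  -- best is none exactly when the dict is empty (Python: TypeError), excluded by Pre_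
  (best.map (·.1)).getD ""

-- ===== PRECONDITION & SPEC =====
-- Pre_ excludes only the empty tasks_to_methods dict, on which A raises ValueError (max of an empty dict).
def Pre_determine_task (method_list : List String) (tasks_to_methods : List (String × List String)) : Prop :=
  tasks_to_methods ≠ []
instance (method_list : List String) (tasks_to_methods : List (String × List String)) : Decidable (Pre_determine_task method_list tasks_to_methods) := by unfold Pre_determine_task; infer_instance
def pvWitness_determine_task : List String × (List (String × List String)) :=
  (["a", "b", "a"], [("T", ["a", "c"]), ("U", ["b"])])
def Spec_determine_task (method_list : List String) (tasks_to_methods : List (String × List String)) (out : String) : Prop := out = determine_task_alt method_list tasks_to_methods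
instance (method_list : List String) (tasks_to_methods : List (String × List String)) (out : String) : Decidable (Spec_determine_task method_list tasks_to_methods out) := by unfold Spec_determine_task; infer_instance

-- ===== CLAIM (what is proved, stated in full; the proofs are below) =====
def Claim_equal_determine_task : Prop := ∀ (method_list : List String) (tasks_to_methods : List (String × List String)), Dom_determine_task method_list tasks_to_methods → Pre_determine_task method_list tasks_to_methods → Spec_determine_task method_list tasks_to_methods (determine_task method_list tasks_to_methods)

-- ===== LEMMAS AND PROOFS =====

-- pvP dl m t = number of entries of dl with key t whose method list contains m
def pvP (dl : List (String × List String)) (m t : String) : Nat :=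
  dl.countP (fun tm => tm.1 == t && decide (m ∈ tm.2))

-- initial zero dict: every lookup with default 0 is 0
theorem pv_getD_init (K : List String) (d : PySem.Dict String Int) (t : String)
    (h : d.getD t 0 = 0) :
    (K.foldl (fun d t' => d.insert t' 0) d).getD t 0 = 0 := by
  induction K generalizing d with
  | nil => exact h
  | cons k K ih =>
      apply ih
      rw [PySem.Dict.getD_insert]
      split <;> simp [h]

-- A's inner loop over the task items
theorem pvA_inner (dl : List (String × List String)) (ts : PySem.Dict String Int)
    (m : String) (c : Int) (t : String) :
    (dl.foldl (fun ts tm => if m ∈ tm.2 then ts.modify tm.1 0 (· + c) else ts) ts).getD t 0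
      = ts.getD t 0 + c * (pvP dl m t : Int) := by
  induction dl generalizing ts with
  | nil => simp [pvP]
  | cons tm dl ih =>
      simp only [List.foldl_cons, ih]
      by_cases hm : m ∈ tm.2
      · simp only [hm, if_pos]
        rw [PySem.Dict.getD_modify]
        by_cases ht : t = tm.1
        · subst ht
          simp [pvP, hm]
          ring
        · have ht' : ¬ (tm.1 = t) := fun h => ht h.symm
          simp [pvP, ht, ht']
      · simp [hm, pvP]

-- A's outer loop
theorem pvA_outer (items : List (String × Int)) (dl : List (String × List String))
    (ts : PySem.Dict String Int) (t : String) :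
    (items.foldl (fun ts mc =>
        dl.foldl (fun ts tm => if mc.1 ∈ tm.2 then ts.modify tm.1 0 (· + mc.2) else ts) ts)
        ts).getD t 0
      = ts.getD t 0 + (items.map (fun mc => mc.2 * (pvP dl mc.1 t : Int))).sum := by
  induction items generalizing ts with
  | nil => simp
  | cons mc items ih =>
      simp only [List.foldl_cons, ih, pvA_inner, List.map_cons, List.sum_cons]
      ring

-- keys are unchanged by a modify at an existing key
theorem pv_keys_modify_mem (d : PySem.Dict String Int) (k : String) (d0 : Int) (f : Int → Int)
    (h : k ∈ d.keys) : (d.modify k d0 f).keys = d.keys := by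
  rw [PySem.Dict.keys_modify, PySem.Dict.keys_insert_of_contains]
  exact (PySem.Dict.contains_iff_mem_keys d k).mpr h

-- A's inner loop keeps the key list
theorem pvA_keys_inner (dl : List (String × List String)) (ts : PySem.Dict String Int)
    (m : String) (c : Int) (h : ∀ tm ∈ dl, tm.1 ∈ ts.keys) :
    (dl.foldl (fun ts tm => if m ∈ tm.2 then ts.modify tm.1 0 (· + c) else ts) ts).keys
      = ts.keys := by
  induction dl generalizing ts with
  | nil => rfl
  | cons tm dl ih =>
      simp only [List.foldl_cons]
      by_cases hm : m ∈ tm.2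
      · simp only [hm, if_pos]
        have hk : (ts.modify tm.1 0 (· + c)).keys = ts.keys :=
          pv_keys_modify_mem ts tm.1 0 _ (h tm (by simp))
        rw [ih _ (fun tm' h' => by rw [hk]; exact h tm' (by simp [h'])), hk]
      · simp only [hm, if_neg, not_false_iff]
        exact ih _ (fun tm' h' => h tm' (by simp [h']))

-- A's outer loop keeps the key list
theorem pvA_keys (items : List (String × Int)) (dl : List (String × List String))
    (ts : PySem.Dict String Int) (h : ∀ tm ∈ dl, tm.1 ∈ ts.keys) :
    (items.foldl (fun ts mc =>
        dl.foldl (fun ts tm => if mc.1 ∈ tm.2 then ts.modify tm.1 0 (· + mc.2) else ts) ts)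
        ts).keys = ts.keys := by
  induction items generalizing ts with
  | nil => rfl
  | cons mc items ih =>
      simp only [List.foldl_cons]
      have hk := pvA_keys_inner dl ts mc.1 mc.2 h
      rw [ih _ (fun tm' h' => by rw [hk]; exact h tm' h'), hk]

-- B's index: appending loop over a Nodup method list
theorem pvB_idx_inner (ms : List String) (hms : ms.Nodup)
    (idx : PySem.Dict String (List String)) (t' m : String) :
    ((ms.foldl (fun idx m' => idx.modify m' [] (· ++ [t'])) idx).getD m [])
      = idx.getD m [] ++ (if m ∈ ms then [t'] else []) := by
  induction ms generalizing idx with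
  | nil => simp
  | cons m' ms ih =>
      simp only [List.foldl_cons]
      rw [ih (List.Nodup.of_cons hms)]
      rw [PySem.Dict.getD_modify]
      by_cases h : m = m'
      · subst h
        have : m ∉ ms := (List.nodup_cons.mp hms).1
        simp [this]
      · simp [h]

theorem pvB_idx (dl : List (String × List String))
    (idx : PySem.Dict String (List String)) (m : String) :
    ((dl.foldl (fun idx tm =>
        (PySem.List.dedup tm.2).foldl (fun idx m' => idx.modify m' [] (· ++ [tm.1])) idx)
        idx).getD m [])
      = idx.getD m [] ++ (dl.filter (fun tm => decide (m ∈ tm.2))).map (·.1) := by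
  induction dl generalizing idx with
  | nil => simp
  | cons tm dl ih =>
      simp only [List.foldl_cons, ih]
      rw [pvB_idx_inner _ (PySem.List.nodup_dedup tm.2)]
      by_cases h : m ∈ tm.2 <;>
        simp [h]

-- B's accumulation loop (values)
theorem pvB_score (xs : List String) (index : PySem.Dict String (List String))
    (sc : PySem.Dict String Int) (t : String) :
    (xs.foldl (fun sc m => (index.getD m []).foldl (fun sc t' => sc.modify t' 0 (· + 1)) sc) sc).getD t 0
      = sc.getD t 0 + (xs.map (fun m => ((index.getD m []).count t : Int))).sum := by
  induction xs generalizing sc with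
  | nil => simp
  | cons m xs ih =>
      simp only [List.foldl_cons, ih, PySem.Dict.getD_foldl_modify_add_one, List.map_cons,
        List.sum_cons]
      ring

-- B's accumulation loop keeps the key list
theorem pvB_keys_inner (l : List String) (sc : PySem.Dict String Int)
    (h : ∀ x ∈ l, x ∈ sc.keys) :
    (l.foldl (fun sc t' => sc.modify t' 0 (· + 1)) sc).keys = sc.keys := by
  induction l generalizing sc with
  | nil => rfl
  | cons x l ih =>
      simp only [List.foldl_cons]
      have hk : (sc.modify x 0 (· + 1)).keys = sc.keys :=
        pv_keys_modify_mem sc x 0 _ (h x (by simp))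
      rw [ih _ (fun x' h' => by rw [hk]; exact h x' (by simp [h'])), hk]

theorem pvB_keys (xs : List String) (index : PySem.Dict String (List String))
    (sc : PySem.Dict String Int)
    (h : ∀ m : String, ∀ t' ∈ index.getD m [], t' ∈ sc.keys) :
    (xs.foldl (fun sc m => (index.getD m []).foldl (fun sc t' => sc.modify t' 0 (· + 1)) sc) sc).keys
      = sc.keys := by
  induction xs generalizing sc with
  | nil => rfl
  | cons m xs ih =>
      simp only [List.foldl_cons]
      have hk := pvB_keys_inner (index.getD m []) sc (h m)
      rw [ih _ (fun m' t' h' => by rw [hk]; exact h m' t' h'), hk]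

-- counting a task in the projected filtered items is pvP
theorem pv_count_idx (dl : List (String × List String)) (m t : String) :
    ((dl.filter (fun tm => decide (m ∈ tm.2))).map (·.1)).count t = pvP dl m t := by
  induction dl with
  | nil => rfl
  | cons tm dl ih =>
      simp only [pvP] at ih ⊢
      by_cases hm : m ∈ tm.2 <;> by_cases ht : tm.1 = t <;>
        simp [hm, ht, ih]

-- sum over occurrences = count-weighted sum over the distinct elements
theorem pv_sum_counter (xs : List String) (f : String → Int) :
    (((PySem.Set.ofList xs).map (fun m => (xs.count m : Int) * f m)).sum)
      = (xs.map f).sum := by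
  rw [Finset.sum_list_map_count xs f]
  rw [← List.sum_toFinset _ (PySem.Set.nodup_ofList xs)]
  have hfs : (PySem.Set.ofList xs).toFinset = xs.toFinset := by
    apply Finset.ext
    intro a
    simp [PySem.Set.mem_ofList]
  rw [hfs]
  apply Finset.sum_congr rfl
  intro m _
  rw [nsmul_eq_mul]

-- the running-max scan over (key, value) pairs is max? over the keys
theorem pv_max_scan (K : List String) (g : String → Int) (acc : Option (String × Int))
    (hacc : ∀ p ∈ acc, p.2 = g p.1) :
    (((K.map (fun t => (t, g t))).foldl (fun best p =>
        match best with
        | none => some p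
        | some q => if p.2 > q.2 then some p else some q) acc).map (·.1))
      = ((K.foldl (fun acc x =>
          match acc with
          | none => some x
          | some m => if g m < g x then some x else some m) (acc.map (·.1)))) := by
  induction K generalizing acc with
  | nil => simp
  | cons t K ih =>
      simp only [List.map_cons, List.foldl_cons]
      cases acc with
      | none =>
          have := ih (some (t, g t)) (by simp)
          simpa using this
      | some q =>
          have hq : q.2 = g q.1 := hacc q (by simp)
          simp only [Option.map_some]
          by_cases h : g q.1 < g t
          · have hgt : q.2 < g t := by rw [hq]; exact h
            rw [if_pos hgt, if_pos h]
            have := ih (some (t, g t)) (by simp)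
            simpa using this
          · have hgt : ¬ (q.2 < g t) := by rw [hq]; exact h
            rw [if_neg hgt, if_neg h]
            have := ih (some q) (by intro p hp; simp at hp; subst hp; exact hq)
            simpa using this

theorem pv_max_scan_none (K : List String) (g : String → Int) :
    (((K.map (fun t => (t, g t))).foldl (fun best p =>
        match best with
        | none => some p
        | some q => if p.2 > q.2 then some p else some q) none).map (·.1))
      = PySem.List.max? K g := by
  rw [pv_max_scan K g none (by simp)]
  simp only [Option.map_none]
  unfold PySem.List.max?
  congr 1
  funext a x
  cases a <;> rfl

-- the whole equivalence, over an arbitrary dict with distinct keys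
theorem pv_core (ml : List String) (d : PySem.Dict String (List String))
    (hnd : d.keys.Nodup) :
    (PySem.List.max?
        ((PySem.Dict.counter ml).items.foldl (fun ts mc =>
            d.items.foldl (fun ts tm =>
              if mc.1 ∈ tm.2 then ts.modify tm.1 0 (· + mc.2) else ts) ts)
          (d.keys.foldl (fun d t => d.insert t 0) (PySem.Dict.empty : PySem.Dict String Int))).keys
        (fun t => ((PySem.Dict.counter ml).items.foldl (fun ts mc =>
            d.items.foldl (fun ts tm =>
              if mc.1 ∈ tm.2 then ts.modify tm.1 0 (· + mc.2) else ts) ts)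
          (d.keys.foldl (fun d t => d.insert t 0) (PySem.Dict.empty : PySem.Dict String Int))).getD t 0)).getD ""
      = (((ml.foldl (fun sc m =>
            (((d.items.foldl (fun idx tm =>
                (PySem.List.dedup tm.2).foldl (fun idx m => idx.modify m [] (· ++ [tm.1])) idx)
              (PySem.Dict.empty : PySem.Dict String (List String)))).getD m []).foldl
              (fun sc t => sc.modify t 0 (· + 1)) sc)
          (d.keys.foldl (fun d t => d.insert t 0) (PySem.Dict.empty : PySem.Dict String Int))).items.foldl
            (fun best p =>
              match best with
              | none => some p
              | some q => if p.2 > q.2 then some p else some q) none).map (·.1)).getD "" := by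
  set S0 : PySem.Dict String Int :=
    d.keys.foldl (fun d t => d.insert t 0) (PySem.Dict.empty : PySem.Dict String Int) with hS0
  set IDX : PySem.Dict String (List String) :=
    d.items.foldl (fun idx tm =>
      (PySem.List.dedup tm.2).foldl (fun idx m => idx.modify m [] (· ++ [tm.1])) idx)
      (PySem.Dict.empty : PySem.Dict String (List String)) with hIDX
  set SA : PySem.Dict String Int :=
    (PySem.Dict.counter ml).items.foldl (fun ts mc =>
      d.items.foldl (fun ts tm =>
        if mc.1 ∈ tm.2 then ts.modify tm.1 0 (· + mc.2) else ts) ts) S0 with hSA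
  set SB : PySem.Dict String Int :=
    ml.foldl (fun sc m =>
      (IDX.getD m []).foldl (fun sc t => sc.modify t 0 (· + 1)) sc) S0 with hSB
  have hk0 : S0.keys = d.keys := by
    rw [hS0, PySem.Dict.keys_foldl_insert (f := fun _ _ => (0 : Int)), PySem.Dict.keys_empty,
      PySem.Set.update_nil_left, PySem.Set.ofList_eq_self_of_nodup _ hnd]
  have hs0 : ∀ t, S0.getD t 0 = 0 := fun t => by
    rw [hS0]
    exact pv_getD_init _ _ _ (by simp [PySem.Dict.getD_empty])
  have hidx : ∀ m, IDX.getD m [] = (d.items.filter (fun tm => decide (m ∈ tm.2))).map (·.1) := by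
    intro m
    rw [hIDX, pvB_idx]
    simp [PySem.Dict.getD_empty]
  have hsub : ∀ m : String, ∀ t' ∈ IDX.getD m [], t' ∈ S0.keys := by
    intro m t' ht'
    rw [hidx m] at ht'
    rw [hk0]
    rcases List.mem_map.mp ht' with ⟨tm, htm, rfl⟩
    exact List.mem_map.mpr ⟨tm, List.mem_of_mem_filter htm, rfl⟩
  have hmemA : ∀ tm ∈ d.items, tm.1 ∈ S0.keys := by
    intro tm h
    rw [hk0]
    exact List.mem_map.mpr ⟨tm, h, rfl⟩
  have hkA : SA.keys = d.keys := by
    rw [hSA]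
    have h := pvA_keys (PySem.Dict.counter ml).items d.items S0 hmemA
    rw [hk0] at h
    exact h
  have hkB : SB.keys = d.keys := by
    rw [hSB]
    have h := pvB_keys ml IDX S0 hsub
    rw [hk0] at h
    exact h
  have hg : ∀ t, SA.getD t 0 = SB.getD t 0 := by
    intro t
    rw [hSA, hSB, pvA_outer, pvB_score, hs0 t, PySem.Dict.items_counter, List.map_map]
    have h1 : ∀ m : String, ((IDX.getD m []).count t) = pvP d.items m t := by
      intro m
      rw [hidx m, pv_count_idx]
    simp only [h1]
    rw [← pv_sum_counter ml (fun m => (pvP d.items m t : Int))]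
    simp [Function.comp_def]
  have hndB : SB.keys.Nodup := by rw [hkB]; exact hnd
  have hitems := PySem.Dict.items_eq_map_keys SB hndB (0 : Int)
  rw [hkB] at hitems
  rw [hkA, hitems, pv_max_scan_none d.keys (fun t => SB.getD t 0)]
  have hfun : (fun t => SA.getD t 0) = (fun t => SB.getD t 0) := funext hg
  rw [hfun]

-- ===== VERDICT (by name: the statement is the Claim_ definition above) =====
theorem determine_task_spec : Claim_equal_determine_task := by
  intro ml ttml _ _
  unfold Spec_determine_task
  simp only [determine_task, determine_task_alt]
  exact pv_core ml (PySem.Dict.ofList ttml) (PySem.Dict.nodup_keys_ofList ttml)
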